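-- pv_equiv track=rewrite | github.com/maitreya-s-crest/Crest-Training- | 02- Python Practice/W3S/22- None Type/Q_1.py | none_calc
-- ===== SOURCE A (Python) =====
-- def none_calc(arr):
--     if len(arr) == 0:
--         return 0
--     head , *tail = arr
--     if head == None:
--         return 1 + none_calc(tail)
--     else:
--         return none_calc(tail)
-- ===== SOURCE B (Python) =====
-- def none_calc(arr):
--     count = 0
--     for x in arr:
--         if x == None:
--             count += 1
--     return count
-- ===== Notes on version B (the rewrite author's own statement) =====
-- stated objective: faster
-- what changed: Replaced A's head/tail recursion (which copies the tail list at every step) with a single iterative counting loop over arr.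
import Mathlib
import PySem

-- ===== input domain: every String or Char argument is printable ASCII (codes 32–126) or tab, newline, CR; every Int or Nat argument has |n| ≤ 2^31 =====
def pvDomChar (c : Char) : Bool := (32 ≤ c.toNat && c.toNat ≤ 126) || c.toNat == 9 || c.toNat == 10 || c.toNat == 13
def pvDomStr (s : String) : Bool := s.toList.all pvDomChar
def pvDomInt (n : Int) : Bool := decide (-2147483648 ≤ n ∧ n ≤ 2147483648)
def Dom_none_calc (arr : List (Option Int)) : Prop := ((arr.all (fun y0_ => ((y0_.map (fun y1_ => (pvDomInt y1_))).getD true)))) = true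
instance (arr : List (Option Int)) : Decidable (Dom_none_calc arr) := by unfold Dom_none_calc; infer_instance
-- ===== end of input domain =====

-- B replaces A's head/tail recursion with a single iterative counting loop (simpler, constant stack).

-- ===== PORT A =====
-- literal transliteration of A: empty check, then head/tail recursion
def none_calc (arr : List (Option Int)) : Int :=
  match arr with
  | [] => 0
  | head :: tail =>
    if head == none then 1 + none_calc tail
    else none_calc tail

-- ===== PORT B =====
-- literal transliteration of B: fold over arr with a counter
def none_calc_alt (arr : List (Option Int)) : Int :=
  arr.foldl (fun count x => if x == none then count + 1 else count) 0

-- ===== PRECONDITION & SPEC =====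
def Spec_none_calc (arr : List (Option Int)) (out : Int) : Prop := out = none_calc_alt arr
instance (arr : List (Option Int)) (out : Int) : Decidable (Spec_none_calc arr out) := by unfold Spec_none_calc; infer_instance

-- ===== CLAIM =====
def Claim_equal_none_calc : Prop := ∀ (arr : List (Option Int)), Dom_none_calc arr → Spec_none_calc arr (none_calc arr)

-- ===== LEMMAS AND PROOFS =====
theorem none_calc_alt_acc (arr : List (Option Int)) (c : Int) :
    arr.foldl (fun count x => if x == none then count + 1 else count) c = c + none_calc arr := by
  induction arr generalizing c with
  | nil => simp [none_calc]
  | cons h t ih =>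
    simp only [List.foldl, none_calc]
    cases h <;> simp only [ih] <;> split <;> simp_all <;> ring

-- ===== VERDICT =====
theorem none_calc_spec : Claim_equal_none_calc := by
  intro arr _
  unfold Spec_none_calc none_calc_alt
  rw [none_calc_alt_acc]
  ring
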